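-- pv_equiv track=rewrite | github.com/Patocuak64/Back-deteccion-anomalias-dentales | app/router.py | build_teeth_fdi_from_detections
-- ===== SOURCE A (Python) =====
-- def build_teeth_fdi_from_detections(detections):
--     """
--     Intenta construir un dict { clase: [FDI...] } a partir de detections.
--     Busca keys típicas: 'tooth_fdi', 'tooth', 'fdi'.
--     """
--     result = {
--         "Caries": [],
--         "Diente_Retenido": [],
--         "Perdida_Osea": [],
--     }
--     if not detections:
--         return result
--
--     for d in detections:
--         cls = d.get("class_name") or d.get("cls_name")
--         if not cls:
--             continue
--
--         tooth = d.get("tooth_fdi") or d.get("tooth") or d.get("fdi")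
--         if tooth is None:
--             continue
--
--         # intenta convertir a int si es string
--         try:
--             tooth_int = int(tooth)
--         except Exception:
--             tooth_int = tooth
--
--         result.setdefault(cls, [])
--         if tooth_int not in result[cls]:
--             result[cls].append(tooth_int)
--
--     return result
-- ===== SOURCE B (Python) =====
-- def build_teeth_fdi_from_detections(detections):
--     """
--     Same result as A by a different decomposition: flatten detections to raw
--     (class, tooth) pairs first, then group per key with an ordered dedup.
--     """
--     result = {
--         "Caries": [],
--         "Diente_Retenido": [],
--         "Perdida_Osea": [],
--     }
--     if not detections:
--         return result
--
--     pairs = []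
--     for d in detections:
--         cls = d.get("class_name") or d.get("cls_name")
--         if not cls:
--             continue
--         tooth = d.get("tooth_fdi") or d.get("tooth") or d.get("fdi")
--         if tooth is None:
--             continue
--         try:
--             tooth = int(tooth)
--         except Exception:
--             pass
--         pairs.append((cls, tooth))
--
--     for cls in dict.fromkeys(c for c, _ in pairs):
--         result.setdefault(cls, [])
--     for k in result:
--         result[k] = list(dict.fromkeys(t for c, t in pairs if c == k))
--     return result
-- ===== Notes on version B (the rewrite author's own statement) =====
-- stated objective: alternative
-- what changed: A grows each class list inline with a membership test per detection; B first flattens detections into a raw (class, tooth) pair list, then builds the key order and fills each class by a per-key gather with an ordered dedup (dict.fromkeys).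
import Mathlib
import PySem

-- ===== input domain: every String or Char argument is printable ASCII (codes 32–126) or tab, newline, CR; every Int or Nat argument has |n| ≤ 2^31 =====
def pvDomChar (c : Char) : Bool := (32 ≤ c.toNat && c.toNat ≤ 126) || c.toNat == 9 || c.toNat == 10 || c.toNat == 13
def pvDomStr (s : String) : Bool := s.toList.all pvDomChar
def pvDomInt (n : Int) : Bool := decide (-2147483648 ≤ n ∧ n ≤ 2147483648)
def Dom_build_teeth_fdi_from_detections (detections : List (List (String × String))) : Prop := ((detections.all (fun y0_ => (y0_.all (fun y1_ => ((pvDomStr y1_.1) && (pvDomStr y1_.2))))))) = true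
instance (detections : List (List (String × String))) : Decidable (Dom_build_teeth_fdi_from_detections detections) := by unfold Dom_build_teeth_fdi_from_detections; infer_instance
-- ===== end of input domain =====

-- B groups by a different decomposition (flatten to (class, tooth) pairs, then per-key ordered
-- dedup) instead of A's inline grow-and-filter loop; objective: alternative, same result.

-- shared extraction helpers (both Pythons execute exactly these `d.get(...) or ...` lines)
def pvGet (d : List (String × String)) (k : String) : Option String :=
  (PySem.Dict.mk d).get? k

-- Python `a or b` on two Optional[str] values (falsy = None or "")
def pvOrStr (a b : Option String) : Option String :=
  match a with
  | some s => if s = "" then b else some s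
  | none => b

def pvCls (d : List (String × String)) : Option String :=
  pvOrStr (pvGet d "class_name") (pvGet d "cls_name")

def pvTooth (d : List (String × String)) : Option String :=
  pvOrStr (pvOrStr (pvGet d "tooth_fdi") (pvGet d "tooth")) (pvGet d "fdi")

def pvSeed : PySem.Dict String (List Int) :=
  PySem.Dict.ofList [("Caries", []), ("Diente_Retenido", []), ("Perdida_Osea", [])]

-- ===== PORT A =====
def pvStepA (acc : PySem.Dict String (List Int)) (d : List (String × String)) :
    PySem.Dict String (List Int) :=
  match pvCls d with
  | none => acc
  | some cls =>
    if cls = "" then acc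
    else
      match pvTooth d with
      | none => acc
      | some tooth =>
        -- int(tooth); under Pre_ this always succeeds (otherwise A keeps the string,
        -- a value outside the declared List Int result type)
        let n : Int := (PySem.Int.ofStr? tooth).getD 0
        let acc1 := acc.setdefault cls []
        let l := acc1.getD cls []
        if n ∈ l then acc1 else acc1.insert cls (l ++ [n])

def build_teeth_fdi_from_detections (detections : List (List (String × String))) :
    List (String × List Int) :=
  if detections.isEmpty then pvSeed.items
  else (detections.foldl pvStepA pvSeed).items

-- ===== PORT B =====
def pvStepPairs (ps : List (String × Int)) (d : List (String × String)) : List (String × Int) :=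
  match pvCls d with
  | none => ps
  | some cls =>
    if cls = "" then ps
    else
      match pvTooth d with
      | none => ps
      | some tooth => ps ++ [(cls, (PySem.Int.ofStr? tooth).getD 0)]

def build_teeth_fdi_from_detections_alt (detections : List (List (String × String))) :
    List (String × List Int) :=
  if detections.isEmpty then pvSeed.items
  else
    let pairs := detections.foldl pvStepPairs []
    let base := (PySem.List.dedup (pairs.map (·.1))).foldl
      (fun d k => d.setdefault k ([] : List Int)) pvSeed
    base.items.map
      (fun p => (p.1, PySem.List.dedup ((pairs.filter (fun q => q.1 == p.1)).map (·.2))))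

-- ===== PRECONDITION & SPEC =====
-- Pre_ excludes exactly the inputs on which a kept detection's tooth string is not int()-parseable:
-- there A returns a dict whose list contains that string, a value outside the declared
-- List (String × List Int) return type, unrepresentable in the port.
def Pre_build_teeth_fdi_from_detections (detections : List (List (String × String))) : Prop :=
  (detections.all (fun d =>
    match pvCls d with
    | none => true
    | some cls =>
      if cls = "" then true
      else
        match pvTooth d with
        | none => true
        | some t => (PySem.Int.ofStr? t).isSome)) = true

instance (detections : List (List (String × String))) :
    Decidable (Pre_build_teeth_fdi_from_detections detections) := by
  unfold Pre_build_teeth_fdi_from_detections; infer_instance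

def pvWitness_build_teeth_fdi_from_detections : (List (List (String × String))) :=
  [[("class_name", "Caries"), ("tooth", "11")], [("cls_name", "Quiste"), ("fdi", " 26 ")]]

def Spec_build_teeth_fdi_from_detections (detections : List (List (String × String)))
    (out : List (String × List Int)) : Prop :=
  out = build_teeth_fdi_from_detections_alt detections

instance (detections : List (List (String × String))) (out : List (String × List Int)) :
    Decidable (Spec_build_teeth_fdi_from_detections detections out) := by
  unfold Spec_build_teeth_fdi_from_detections; infer_instance

-- ===== CLAIM (what is proved, stated in full; the proofs are below) =====
def Claim_equal_build_teeth_fdi_from_detections : Prop :=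
  ∀ (detections : List (List (String × String))),
    Dom_build_teeth_fdi_from_detections detections →
    Pre_build_teeth_fdi_from_detections detections →
    Spec_build_teeth_fdi_from_detections detections (build_teeth_fdi_from_detections detections)

-- ===== LEMMAS AND PROOFS =====

-- the contribution of a single detection: `none` = skipped, `some (cls, n)` = kept
def pvPair? (d : List (String × String)) : Option (String × Int) :=
  match pvCls d with
  | none => none
  | some cls =>
    if cls = "" then none
    else
      match pvTooth d with
      | none => none
      | some tooth => some (cls, (PySem.Int.ofStr? tooth).getD 0)

lemma pvStepPairs_eq (ps : List (String × Int)) (d : List (String × String)) :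
    pvStepPairs ps d = ps ++ (pvPair? d).toList := by
  unfold pvStepPairs pvPair?
  cases pvCls d with
  | none => simp
  | some cls =>
    by_cases h : cls = "" <;> simp [h]
    cases pvTooth d <;> simp

lemma pvStepA_none {d : List (String × String)} (h : pvPair? d = none)
    (acc : PySem.Dict String (List Int)) : pvStepA acc d = acc := by
  unfold pvPair? at h
  unfold pvStepA
  cases hc : pvCls d with
  | none => rfl
  | some cls =>
    rw [hc] at h
    by_cases he : cls = ""
    · simp [he]
    · simp only [he, if_false]
      cases ht : pvTooth d with
      | none => rfl
      | some t => rw [ht] at h; simp [he] at h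

lemma pvStepA_some {d : List (String × String)} {c : String} {n : Int}
    (h : pvPair? d = some (c, n)) (acc : PySem.Dict String (List Int)) :
    pvStepA acc d =
      (let acc1 := acc.setdefault c []
       let l := acc1.getD c []
       if n ∈ l then acc1 else acc1.insert c (l ++ [n])) := by
  unfold pvPair? at h
  unfold pvStepA
  cases hc : pvCls d with
  | none => rw [hc] at h; simp at h
  | some cls =>
    rw [hc] at h
    by_cases he : cls = ""
    · simp [he] at h
    · simp only [he, if_false] at h ⊢
      cases ht : pvTooth d with
      | none => rw [ht] at h; simp at h
      | some t =>
        rw [ht] at h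
        simp only [Option.some.injEq, Prod.mk.injEq] at h
        simp [h.1, h.2]

lemma getD_nil_of_values_nil {es : List (String × List Int)}
    (h : ∀ p ∈ es, p.2 = []) (k : String) : (PySem.Dict.mk es).getD k [] = [] := by
  simp only [PySem.Dict.getD, PySem.Dict.get?]
  cases hf : es.find? (fun p => p.1 == k) with
  | none => rfl
  | some p => simp [h p (List.mem_of_find?_eq_some hf)]

lemma pvSeed_getD (k : String) : pvSeed.getD k [] = [] := by
  have : pvSeed = PySem.Dict.mk [("Caries", []), ("Diente_Retenido", []), ("Perdida_Osea", [])] := by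
    decide
  rw [this]
  exact getD_nil_of_values_nil (by intro p hp; fin_cases hp <;> rfl) k

lemma keys_stepA_some (acc : PySem.Dict String (List Int)) (c : String) (n : Int) :
    ((let acc1 := acc.setdefault c []
      let l := acc1.getD c []
      if n ∈ l then acc1 else acc1.insert c (l ++ [n])) :
        PySem.Dict String (List Int)).keys = PySem.Set.add acc.keys c := by
  simp only []
  have hk1 : (acc.setdefault c ([] : List Int)).keys = PySem.Set.add acc.keys c := by
    rw [PySem.Dict.keys_setdefault, PySem.Set.add_eq_ite]
    by_cases h : c ∈ acc.keys
    · simp [h, (PySem.Dict.contains_iff_mem_keys acc c).mpr h]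
    · have : acc.contains c = false := by
        cases hc : acc.contains c
        · rfl
        · exact absurd ((PySem.Dict.contains_iff_mem_keys acc c).mp hc) h
      simp [h, this]
  split
  · exact hk1
  · rw [PySem.Dict.keys_insert_of_contains _ _
      (by rw [PySem.Dict.contains_setdefault]; simp)]
    exact hk1

lemma getD_stepA_some (acc : PySem.Dict String (List Int)) (c : String) (n : Int) (k : String) :
    ((let acc1 := acc.setdefault c []
      let l := acc1.getD c []
      if n ∈ l then acc1 else acc1.insert c (l ++ [n])) :
        PySem.Dict String (List Int)).getD k [] =
      if k = c then PySem.Set.add (acc.getD c []) n else acc.getD k [] := by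
  simp only []
  have hself : (acc.setdefault c ([] : List Int)).getD c [] = acc.getD c [] :=
    PySem.Dict.getD_setdefault_self acc c [] []
  by_cases hk : k = c
  · subst hk
    rw [PySem.Set.add_eq_ite]
    split
    · next hmem => rw [hself] at hmem ⊢; simp [hmem]
    · next hmem =>
      rw [hself] at hmem
      rw [PySem.Dict.getD_insert]
      simp [hself, hmem]
  · have hne : (acc.setdefault c ([] : List Int)).getD k [] = acc.getD k [] := by
      rw [PySem.Dict.getD_eq_get?_getD, PySem.Dict.get?_setdefault_of_ne acc [] hk,
        ← PySem.Dict.getD_eq_get?_getD]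
    split
    · simp [hne]
    · rw [PySem.Dict.getD_insert]
      simp [hk, hne]

-- the invariant of A's loop, phrased against B's raw pair list
lemma invA (ds : List (List (String × String))) :
    (ds.foldl pvStepA pvSeed).keys =
        PySem.Set.update pvSeed.keys ((ds.foldl pvStepPairs []).map (·.1)) ∧
    (ds.foldl pvStepA pvSeed).keys.Nodup ∧
    ∀ k, (ds.foldl pvStepA pvSeed).getD k [] =
      PySem.List.dedup (((ds.foldl pvStepPairs []).filter (fun q => q.1 == k)).map (·.2)) := by
  induction ds using List.reverseRecOn with
  | nil =>
    refine ⟨by simp [PySem.Set.update_nil], by decide, fun k => ?_⟩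
    simpa using pvSeed_getD k
  | append_singleton ds d ih =>
    obtain ⟨ihk, ihn, ihg⟩ := ih
    rw [List.foldl_append, List.foldl_append]
    simp only [List.foldl_cons, List.foldl_nil]
    rw [pvStepPairs_eq]
    cases hp : pvPair? d with
    | none =>
      rw [pvStepA_none hp]
      simpa using ⟨ihk, ihn, ihg⟩
    | some cn =>
      obtain ⟨c, n⟩ := cn
      rw [pvStepA_some hp]
      refine ⟨?_, ?_, ?_⟩
      · rw [keys_stepA_some, ihk]
        simp [PySem.Set.update_append, PySem.Set.update_cons, PySem.Set.update_nil]
      · rw [keys_stepA_some]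
        exact PySem.Set.nodup_add _ _ ihn
      · intro k
        rw [getD_stepA_some]
        by_cases hk : k = c
        · subst hk
          rw [ihg k]
          simp only [if_true, Option.toList]
          have : ((ds.foldl pvStepPairs [] ++ [(k, n)]).filter (fun q => q.1 == k)).map (·.2) =
              ((ds.foldl pvStepPairs []).filter (fun q => q.1 == k)).map (·.2) ++ [n] := by
            simp [List.filter_append]
          rw [this]
          simp only [PySem.List.dedup_eq_ofList]
          rw [PySem.Set.ofList_append_singleton]
        · simp only [if_neg hk, Option.toList]
          rw [ihg k]
          have : (c == k) = false := by simpa using fun h => hk h.symm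
          simp [List.filter_append, this]

lemma keys_foldl_setdefault (ks : List String) (d : PySem.Dict String (List Int)) :
    (ks.foldl (fun d k => d.setdefault k ([] : List Int)) d).keys =
      PySem.Set.update d.keys ks := by
  induction ks generalizing d with
  | nil => simp [PySem.Set.update_nil]
  | cons k ks ih =>
    rw [List.foldl_cons, PySem.Set.update_cons, ih]
    congr 1
    rw [PySem.Dict.keys_setdefault, PySem.Set.add_eq_ite]
    by_cases h : k ∈ d.keys
    · simp [h, (PySem.Dict.contains_iff_mem_keys d k).mpr h]
    · have : d.contains k = false := by
        cases hc : d.contains k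
        · rfl
        · exact absurd ((PySem.Dict.contains_iff_mem_keys d k).mp hc) h
      simp [h, this]

lemma update_ofList (s : PySem.Set String) (xs : List String) :
    s.update (PySem.Set.ofList xs) = s.update xs := by
  induction xs using List.reverseRecOn with
  | nil => rfl
  | append_singleton xs x ih =>
    rw [PySem.Set.ofList_append_singleton, PySem.Set.update_append,
      PySem.Set.update_cons, PySem.Set.update_nil, PySem.Set.add_eq_ite]
    by_cases h : x ∈ PySem.Set.ofList xs
    · rw [if_pos h, ih, PySem.Set.add_of_mem]
      rw [PySem.Set.mem_update]
      exact Or.inr ((PySem.Set.mem_ofList xs x).mp h)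
    · rw [if_neg h, PySem.Set.update_append, PySem.Set.update_cons, PySem.Set.update_nil, ih]

lemma ports_agree (detections : List (List (String × String))) :
    build_teeth_fdi_from_detections detections =
      build_teeth_fdi_from_detections_alt detections := by
  unfold build_teeth_fdi_from_detections build_teeth_fdi_from_detections_alt
  cases detections with
  | nil => rfl
  | cons d0 ds0 =>
    rw [if_neg (by simp), if_neg (by simp)]
    simp only []
    set ds := d0 :: ds0 with hds
    obtain ⟨hkeys, hnodup, hgetD⟩ := invA ds
    set pairs := ds.foldl pvStepPairs [] with hpairs
    set base := (PySem.List.dedup (pairs.map (·.1))).foldl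
      (fun d k => d.setdefault k ([] : List Int)) pvSeed with hbase
    have hbkeys : base.keys = (ds.foldl pvStepA pvSeed).keys := by
      rw [hbase, keys_foldl_setdefault, hkeys]
      simp only [PySem.List.dedup_eq_ofList]
      exact update_ofList _ _
    have hbnodup : base.keys.Nodup := hbkeys ▸ hnodup
    rw [PySem.Dict.items_eq_map_keys _ hnodup ([] : List Int),
      PySem.Dict.items_eq_map_keys base hbnodup ([] : List Int), hbkeys, List.map_map]
    refine List.map_congr_left (fun k _ => ?_)
    simp only [Function.comp]
    rw [hgetD k]

-- ===== VERDICT (by name: the statement is the Claim_ definition above) =====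
theorem build_teeth_fdi_from_detections_spec : Claim_equal_build_teeth_fdi_from_detections := by
  intro detections _ _
  unfold Spec_build_teeth_fdi_from_detections
  exact ports_agree detections
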